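-- pv_equiv track=rewrite | github.com/asidko/binance-picker | picker.py | make_more_human_readable_interval_label
-- ===== SOURCE A (Python) =====
-- def make_more_human_readable_interval_label(label: str) -> str:
--     transitions = {'m': ('h', 60), 'h': ('d', 24), 'd': ('M', 30)}
--     while label[-1] in transitions:
--         value, unit = int(label[:-1]), label[-1]
--         new_unit, divisor = transitions[unit]
--         if value % divisor == 0:
--             label = f"{value // divisor}{new_unit}"
--         else:
--             break
--     return label
-- ===== SOURCE B (Python) =====
-- def make_more_human_readable_interval_label(label: str) -> str:
--     units = {'m': 1, 'h': 60, 'd': 1440}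
--     if not label or label[-1] not in units:
--         return label
--     unit = label[-1]
--     minutes = int(label[:-1]) * units[unit]
--     for u, div in (('M', 43200), ('d', 1440), ('h', 60), ('m', 1)):
--         if minutes % div == 0:
--             return label if u == unit else f"{minutes // div}{u}"
--     return label
-- ===== Notes on version B (the rewrite author's own statement) =====
-- stated objective: simpler
-- what changed: A repeatedly re-parses and re-formats the label in an ascending divide-and-break while loop (int/str up to three times); B parses once, converts to total minutes with the unit's factor, and classifies with a single descending scan over cumulative divisors (M=43200, d=1440, h=60, m=1), returning the label unchanged when its own unit wins.
-- outside the precondition, e.g. on make_more_human_readable_interval_label('m'): A raises ValueError, B raises ValueError; on make_more_human_readable_interval_label('h'): A raises ValueError, B raises ValueError; on make_more_human_readable_interval_label('d'): A raises ValueError, B raises ValueError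
import Mathlib
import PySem

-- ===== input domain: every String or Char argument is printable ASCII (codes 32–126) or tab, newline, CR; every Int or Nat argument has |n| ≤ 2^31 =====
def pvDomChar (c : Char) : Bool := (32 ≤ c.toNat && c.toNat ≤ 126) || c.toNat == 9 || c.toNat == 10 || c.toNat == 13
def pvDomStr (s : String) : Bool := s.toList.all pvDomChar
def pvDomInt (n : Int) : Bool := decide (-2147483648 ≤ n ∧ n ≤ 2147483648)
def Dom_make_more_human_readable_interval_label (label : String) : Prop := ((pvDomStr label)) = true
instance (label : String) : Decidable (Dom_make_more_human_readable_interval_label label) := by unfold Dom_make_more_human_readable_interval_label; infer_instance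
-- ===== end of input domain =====

-- B replaces A's parse/format/re-parse while loop by a single parse to total minutes and one
-- descending divisor scan (objective: simpler; same exact return values on Pre_).

-- ===== PORT A =====
-- transitions = {'m': ('h', 60), 'h': ('d', 24), 'd': ('M', 30)}
def pvTransitions : PySem.Dict Char (Char × Int) :=
  PySem.Dict.ofList [('m', ('h', 60)), ('h', ('d', 24)), ('d', ('M', 30))]

-- A's while loop. The unit chain strictly climbs m → h → d → M and 'M' is not a key of
-- transitions, so 4 iterations always suffice: the fuel is only a totality guard, it never
-- changes the computed value. `none` branches of pyGet?/ofChars? are where Python raises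
-- (IndexError / ValueError); those inputs are excluded by Pre_ below.
def pvLoopA : Nat → List Char → List Char
  | 0, cs => cs
  | fuel + 1, cs =>
    match PySem.List.pyGet? cs (-1) with          -- label[-1] (IndexError when empty)
    | none => cs
    | some unit =>
      match PySem.Dict.get? pvTransitions unit with    -- while label[-1] in transitions
      | none => cs
      | some (newUnit, divisor) =>
        match PySem.Int.ofChars? (PySem.List.slice cs none (some (-1))) with  -- int(label[:-1])
        | none => cs
        | some v =>
          if PySem.Int.mod v divisor = 0 then          -- if value % divisor == 0
            pvLoopA fuel (PySem.Int.toChars (PySem.Int.floordiv v divisor) ++ [newUnit])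
          else cs                                      -- break

def make_more_human_readable_interval_label (label : String) : String :=
  String.ofList (pvLoopA 4 label.toList)

-- ===== PORT B =====
-- units = {'m': 1, 'h': 60, 'd': 1440}
def pvUnits : PySem.Dict Char Int :=
  PySem.Dict.ofList [('m', 1), ('h', 60), ('d', 1440)]

-- for u, div in (('M', 43200), ('d', 1440), ('h', 60), ('m', 1)): ...
def pvScanB : Int → Char → String → List (Char × Int) → String
  | _, _, label, [] => label
  | minutes, unit, label, (u, d) :: rest =>
    if PySem.Int.mod minutes d = 0 then
      (if u = unit then label
       else String.ofList (PySem.Int.toChars (PySem.Int.floordiv minutes d) ++ [u]))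
    else pvScanB minutes unit label rest

def make_more_human_readable_interval_label_alt (label : String) : String :=
  match PySem.List.pyGet? label.toList (-1) with       -- if not label or label[-1] not in units
  | none => label
  | some unit =>
    match PySem.Dict.get? pvUnits unit with
    | none => label
    | some f =>
      match PySem.Int.ofChars? (PySem.List.slice label.toList none (some (-1))) with
      | none => label                                  -- int(label[:-1]) raises: outside Pre_
      | some v =>
        pvScanB (v * f) unit label [('M', 43200), ('d', 1440), ('h', 60), ('m', 1)]

-- ===== PRECONDITION & SPEC =====
-- Pre_ excludes exactly the inputs where Python A raises: the empty string (IndexError on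
-- label[-1]) and labels whose unit suffix is 'm'/'h'/'d' but whose prefix is not int()-parsable
-- (ValueError).
def Pre_make_more_human_readable_interval_label (label : String) : Prop :=
  label.toList ≠ [] ∧
  (label.toList.getLast?.getD 'x' ∈ (['m', 'h', 'd'] : List Char) →
    (PySem.Int.ofChars? label.toList.dropLast).isSome = true)

instance (label : String) : Decidable (Pre_make_more_human_readable_interval_label label) := by
  unfold Pre_make_more_human_readable_interval_label; infer_instance

def pvWitness_make_more_human_readable_interval_label : String := "25h"

def Spec_make_more_human_readable_interval_label (label : String) (out : String) : Prop :=
  out = make_more_human_readable_interval_label_alt label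

instance (label : String) (out : String) : Decidable (Spec_make_more_human_readable_interval_label label out) := by
  unfold Spec_make_more_human_readable_interval_label; infer_instance

-- ===== CLAIM (what is proved, stated in full; the proofs are below) =====
def Claim_equal_make_more_human_readable_interval_label : Prop :=
  ∀ (label : String), Dom_make_more_human_readable_interval_label label →
    Pre_make_more_human_readable_interval_label label →
    Spec_make_more_human_readable_interval_label label (make_more_human_readable_interval_label label)

-- ===== LEMMAS AND PROOFS =====

-- PySem.Int.ofChars? delegates the digit scan to a module-private helper; pv_extract below
-- re-exposes that helper and its defining equations through an existential, proved by
-- definitional equality, so the int(str(q)) == q roundtrip can be proved without re-implementing int().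
def pvOfCharsVia (g : List Char → Bool → Nat → Option Nat) : List Char → Option Int := fun s =>
  have cs := (List.dropWhile PySem.Int.isIntSpace (List.dropWhile PySem.Int.isIntSpace s).reverse).reverse
  match cs with
  | '-' :: ds => Option.map (fun n => -n) (do let a ← (match ds with | [] => none | ds => g ds false 0); pure ((a : Int)))
  | '+' :: ds => Option.map (fun n => n) (do let a ← (match ds with | [] => none | ds => g ds false 0); pure ((a : Int)))
  | ds => Option.map (fun n => n) (do let a ← (match ds with | [] => none | ds => g ds false 0); pure ((a : Int)))

theorem pv_extract : ∃ g : List Char → Bool → Nat → Option Nat,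
    (∀ s, PySem.Int.ofChars? s = pvOfCharsVia g s)
  ∧ (∀ b a, g [] b a = if b = true then some a else none)
  ∧ (∀ c rest b a, g (c :: rest) b a =
      if c.isDigit = true then g rest true (a * 10 + (c.toNat - '0'.toNat))
      else if c = '_' ∧ b = true then
        (match rest with | d :: _ => if d.isDigit = true then g rest false a else none | [] => none)
      else none) := by
  refine ⟨?g, ?h1, ?h2, ?h3⟩
  case h1 => intro s; with_unfolding_all rfl
  case h2 => intro b a; with_unfolding_all rfl
  case h3 => intro c rest b a; with_unfolding_all rfl

-- str(m) for a Nat, as a structurally recursive function (Nat.toDigits uses fuel).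
def pvRep (n : Nat) : List Char :=
  if n < 10 then [Nat.digitChar n]
  else pvRep (n / 10) ++ [Nat.digitChar (n % 10)]
decreasing_by exact Nat.div_lt_self (by omega) (by omega)

theorem pvDigitChar_lemma : ∀ m : Nat, m < 10 →
    (Nat.digitChar m).isDigit = true ∧ (Nat.digitChar m).toNat = m + 48 := by decide

theorem pvCore_eq : ∀ (fuel n : Nat) (acc : List Char), 0 < fuel → n < 10 ^ fuel →
    Nat.toDigitsCore 10 fuel n acc = pvRep n ++ acc := by
  intro fuel
  induction fuel with
  | zero => intro n acc h; omega
  | succ f ih =>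
    intro n acc _ h
    rw [Nat.toDigitsCore]
    by_cases h10 : n < 10
    · have h0 : n / 10 = 0 := by omega
      rw [pvRep]
      simp [h0, h10, Nat.mod_eq_of_lt h10]
    · have hne : ¬ n / 10 = 0 := by omega
      simp only [hne, if_false]
      have hp : 10 ^ (f+1) = 10 ^ f * 10 := by ring
      have hf : 0 < f := by
        by_contra hf0
        have : f = 0 := by omega
        subst this
        simp at hp h
        omega
      have h2 : n / 10 < 10 ^ f := by omega
      rw [ih (n / 10) _ hf h2]
      conv_rhs => rw [pvRep]
      simp [h10]

theorem pvRep_toDigits (n : Nat) : Nat.toDigits 10 n = pvRep n := by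
  rw [Nat.toDigits, pvCore_eq (n+1) n [] (by omega) (by
    calc n < 10 ^ n := Nat.lt_pow_self (by omega)
    _ ≤ 10 ^ (n+1) := Nat.pow_le_pow_right (by omega) (by omega))]
  simp

theorem pvRep_digits : ∀ (n : Nat), ∀ c ∈ pvRep n, c.isDigit = true := by
  intro n
  induction n using pvRep.induct with
  | case1 n h =>
    rw [pvRep]
    simp only [h, if_true, List.mem_singleton]
    rintro c rfl
    exact (pvDigitChar_lemma n h).1
  | case2 n h ih =>
    rw [pvRep]
    simp only [h, if_false, List.mem_append, List.mem_singleton]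
    rintro c (hc | rfl)
    · exact ih c hc
    · exact (pvDigitChar_lemma (n % 10) (by omega)).1

theorem pvRep_ne_nil (n : Nat) : pvRep n ≠ [] := by
  rw [pvRep]; split <;> simp

theorem pvRep_val : ∀ (n : Nat) (a : Nat),
    (pvRep n).foldl (fun x c => x * 10 + (c.toNat - '0'.toNat)) a = a * 10 ^ (pvRep n).length + n := by
  intro n
  induction n using pvRep.induct with
  | case1 n h =>
    intro a
    rw [pvRep]
    simp only [h, if_true, List.foldl_cons, List.foldl_nil, List.length_singleton, pow_one]
    have h1 := (pvDigitChar_lemma n h).2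
    have h3 : '0'.toNat = 48 := rfl
    rw [h3, h1]
    omega
  | case2 n h ih =>
    intro a
    rw [pvRep]
    simp only [h, if_false, List.foldl_append, List.length_append, List.foldl_cons,
      List.foldl_nil, List.length_cons, List.length_nil]
    rw [ih]
    have h1 := (pvDigitChar_lemma (n % 10) (by omega)).2
    have hp : 10 ^ (((pvRep (n/10)).length) + (0+1)) = 10 ^ ((pvRep (n/10)).length) * 10 := by ring
    rw [hp]
    have h2 := Nat.div_add_mod n 10
    have h3 : '0'.toNat = 48 := rfl
    rw [h1, h3]
    ring_nf
    omega

theorem pvDigit_not_space {c : Char} (h : c.isDigit = true) :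
    PySem.Int.isIntSpace c = false ∧ c ≠ '-' ∧ c ≠ '+' := by
  simp only [Char.isDigit, decide_eq_true_eq, Bool.and_eq_true] at h
  refine ⟨?_, ?_, ?_⟩
  · simp only [PySem.Int.isIntSpace, Bool.or_eq_false_iff, decide_eq_false_iff_not]
    and_intros <;> (rintro rfl; simp_all)
  · rintro rfl; simp_all
  · rintro rfl; simp_all

theorem pvDropWhile_no (l : List Char) (h : ∀ c ∈ l, PySem.Int.isIntSpace c = false) :
    l.dropWhile PySem.Int.isIntSpace = l := by
  cases l with
  | nil => simp
  | cons c t => rw [List.dropWhile_cons_of_neg (by simp [h c (by simp)])]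

theorem pvRun (g : List Char → Bool → Nat → Option Nat)
    (h0 : ∀ b a, g [] b a = if b = true then some a else none)
    (h1 : ∀ c rest b a, g (c :: rest) b a =
      if c.isDigit = true then g rest true (a * 10 + (c.toNat - '0'.toNat))
      else if c = '_' ∧ b = true then
        (match rest with | d :: _ => if d.isDigit = true then g rest false a else none | [] => none)
      else none) :
    ∀ (ds : List Char) (b : Bool) (a : Nat), ds ≠ [] → (∀ c ∈ ds, c.isDigit = true) →
      g ds b a = some (ds.foldl (fun x c => x * 10 + (c.toNat - '0'.toNat)) a) := by
  intro ds
  induction ds with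
  | nil => intro b a h; exact absurd rfl h
  | cons c rest ih =>
    intro b a _ hd
    rw [h1]
    simp only [hd c (by simp), if_true, List.foldl_cons]
    cases rest with
    | nil => rw [h0]; simp
    | cons d tl => exact ih true _ (by simp) (fun x hx => hd x (by simp [hx]))

theorem pvCleaned (l : List Char) (h : ∀ c ∈ l, PySem.Int.isIntSpace c = false) :
    (List.dropWhile PySem.Int.isIntSpace (List.dropWhile PySem.Int.isIntSpace l).reverse).reverse = l := by
  rw [pvDropWhile_no l h, pvDropWhile_no l.reverse (by intro c hc; exact h c (by simpa using hc)),
    List.reverse_reverse]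

theorem pvVia_pos (g : List Char → Bool → Nat → Option Nat)
    (h0 : ∀ b a, g [] b a = if b = true then some a else none)
    (h1 : ∀ c rest b a, g (c :: rest) b a =
      if c.isDigit = true then g rest true (a * 10 + (c.toNat - '0'.toNat))
      else if c = '_' ∧ b = true then
        (match rest with | d :: _ => if d.isDigit = true then g rest false a else none | [] => none)
      else none) (m : Nat) :
    pvOfCharsVia g (pvRep m) = some (m : Int) := by
  have hdig := pvRep_digits m
  have hclean := pvCleaned (pvRep m) (fun c hc => (pvDigit_not_space (hdig c hc)).1)
  obtain ⟨c, rest, hcr⟩ : ∃ c rest, pvRep m = c :: rest := by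
    cases hrep : pvRep m with
    | nil => exact absurd hrep (pvRep_ne_nil m)
    | cons c rest => exact ⟨c, rest, rfl⟩
  have hc : c.isDigit = true := hdig c (by simp [hcr])
  have hcm : c ≠ '-' := (pvDigit_not_space hc).2.1
  have hcp : c ≠ '+' := (pvDigit_not_space hc).2.2
  have hval := pvRep_val m 0
  rw [hcr] at hclean hval ⊢
  simp only [pvOfCharsVia, hclean]
  split
  · next ds heq => exact absurd ((by simpa using congrArg (fun l => l.headD ' ') heq.symm : '-' = c)).symm hcm
  · next ds heq => exact absurd ((by simpa using congrArg (fun l => l.headD ' ') heq.symm : '+' = c)).symm hcp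
  · rw [show (match c :: rest with | [] => (none : Option Nat) | ds => g ds false 0) = g (c :: rest) false 0 from rfl,
      pvRun g h0 h1 (c :: rest) false 0 (by simp) (by rw [← hcr]; exact hdig)]
    simp only [Option.bind_eq_bind, Option.bind_some]
    rw [hval]
    simp

theorem pvVia_neg (g : List Char → Bool → Nat → Option Nat)
    (h0 : ∀ b a, g [] b a = if b = true then some a else none)
    (h1 : ∀ c rest b a, g (c :: rest) b a =
      if c.isDigit = true then g rest true (a * 10 + (c.toNat - '0'.toNat))
      else if c = '_' ∧ b = true then
        (match rest with | d :: _ => if d.isDigit = true then g rest false a else none | [] => none)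
      else none) (m : Nat) :
    pvOfCharsVia g ('-' :: pvRep m) = some (-(m : Int)) := by
  have hdig := pvRep_digits m
  have hclean : (List.dropWhile PySem.Int.isIntSpace
      (List.dropWhile PySem.Int.isIntSpace ('-' :: pvRep m)).reverse).reverse = '-' :: pvRep m := by
    apply pvCleaned
    intro c hc
    rcases List.mem_cons.mp hc with rfl | hc
    · decide
    · exact (pvDigit_not_space (hdig c hc)).1
  obtain ⟨c, rest, hcr⟩ : ∃ c rest, pvRep m = c :: rest := by
    cases hrep : pvRep m with
    | nil => exact absurd hrep (pvRep_ne_nil m)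
    | cons c rest => exact ⟨c, rest, rfl⟩
  have hval := pvRep_val m 0
  simp only [pvOfCharsVia, hclean]
  rw [hcr,
    show (match c :: rest with | [] => (none : Option Nat) | ds => g ds false 0) = g (c :: rest) false 0 from rfl,
    pvRun g h0 h1 (c :: rest) false 0 (by simp) (by rw [← hcr]; exact hdig)]
  rw [hcr] at hval
  simp only [Option.bind_eq_bind, Option.bind_some]
  rw [hval]
  simp

theorem pv_roundtrip (n : Int) : PySem.Int.ofChars? (PySem.Int.toChars n) = some n := by
  obtain ⟨g, hg, h0, h1⟩ := pv_extract
  rw [hg]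
  by_cases hn : n < 0
  · have : PySem.Int.toChars n = '-' :: Nat.toDigits 10 n.natAbs := by
      simp [PySem.Int.toChars, hn]
    rw [this, pvRep_toDigits, pvVia_neg g h0 h1]
    congr 1
    omega
  · have : PySem.Int.toChars n = Nat.toDigits 10 n.toNat := by
      simp [PySem.Int.toChars, hn]
    rw [this, pvRep_toDigits, pvVia_pos g h0 h1]
    congr 1
    omega

theorem pvTrans_none (u : Char) (h1 : u ≠ 'm') (h2 : u ≠ 'h') (h3 : u ≠ 'd') :
    PySem.Dict.get? pvTransitions u = none := by
  have h : pvTransitions = PySem.Dict.mk [('m', ('h', 60)), ('h', ('d', 24)), ('d', ('M', 30))] := by decide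
  rw [h]
  simp [beq_iff_eq, Ne.symm h1, Ne.symm h2, Ne.symm h3, PySem.Dict.get?]

theorem pvUnits_none (u : Char) (h1 : u ≠ 'm') (h2 : u ≠ 'h') (h3 : u ≠ 'd') :
    PySem.Dict.get? pvUnits u = none := by
  have h : pvUnits = PySem.Dict.mk [('m', 1), ('h', 60), ('d', 1440)] := by decide
  rw [h]
  simp [beq_iff_eq, Ne.symm h1, Ne.symm h2, Ne.symm h3, PySem.Dict.get?]

-- one iteration of A's loop on a canonical intermediate label  str(q) ++ [u]
theorem pvLoopA_step (fuel : Nat) (q d : Int) (u nu : Char)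
    (hu : PySem.Dict.get? pvTransitions u = some (nu, d)) :
    pvLoopA (fuel + 1) (PySem.Int.toChars q ++ [u]) =
      if PySem.Int.mod q d = 0 then
        pvLoopA fuel (PySem.Int.toChars (PySem.Int.floordiv q d) ++ [nu])
      else PySem.Int.toChars q ++ [u] := by
  rw [pvLoopA]
  simp only [PySem.List.pyGet?_neg_one_append_singleton, hu, PySem.List.slice_to_neg_one,
    List.dropLast_concat, pv_roundtrip]

theorem pvLoopA_stop (fuel : Nat) (cs : List Char) (u : Char)
    (hlast : cs.getLast? = some u) (hu : PySem.Dict.get? pvTransitions u = none) :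
    pvLoopA (fuel + 1) cs = cs := by
  rw [pvLoopA]
  simp only [PySem.List.pyGet?_neg_one, hlast, hu]

-- floor division cancels an exact positive factor
theorem pvFdiv (a k : Int) (ha : 0 < a) : PySem.Int.floordiv (a * k) a = k := by
  rw [PySem.Int.floordiv_eq_ediv_of_pos ha]
  exact Int.mul_ediv_cancel_left k (by omega)

-- ===== VERDICT (by name: the statement is the Claim_ definition above) =====
theorem make_more_human_readable_interval_label_spec : Claim_equal_make_more_human_readable_interval_label := by
  unfold Claim_equal_make_more_human_readable_interval_label
    Spec_make_more_human_readable_interval_label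
  intro label _hdom hpre
  obtain ⟨hne, hp⟩ := hpre
  unfold make_more_human_readable_interval_label make_more_human_readable_interval_label_alt
  cases hlast : label.toList.getLast? with
  | none => exact absurd (List.getLast?_eq_none_iff.mp hlast) hne
  | some u =>
    have hget : PySem.List.pyGet? label.toList (-1) = some u := by
      rw [PySem.List.pyGet?_neg_one, hlast]
    have th : PySem.Dict.get? pvTransitions 'h' = some ('d', 24) := by decide
    have td : PySem.Dict.get? pvTransitions 'd' = some ('M', 30) := by decide
    have tM : PySem.Dict.get? pvTransitions 'M' = none :=
      pvTrans_none 'M' (by decide) (by decide) (by decide)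
    by_cases hm : u = 'm'
    · subst hm
      obtain ⟨v, hv⟩ := Option.isSome_iff_exists.mp (hp (by simp [hlast]))
      have hA4 : pvLoopA 4 label.toList =
          if PySem.Int.mod v 60 = 0 then
            pvLoopA 3 (PySem.Int.toChars (PySem.Int.floordiv v 60) ++ ['h'])
          else label.toList := by
        rw [show (4 : Nat) = 3 + 1 from rfl, pvLoopA]
        simp only [hget, show PySem.Dict.get? pvTransitions 'm' = some ('h', 60) from by decide,
          PySem.List.slice_to_neg_one, hv]
      simp only [hget, show PySem.Dict.get? pvUnits 'm' = some 1 from by decide,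
        PySem.List.slice_to_neg_one, hv, hA4, mul_one]
      by_cases h60 : (60 : Int) ∣ v
      · obtain ⟨k, rfl⟩ := h60
        rw [if_pos (by rw [PySem.Int.mod_eq_zero_iff_dvd]; exact ⟨k, rfl⟩), pvFdiv 60 k (by norm_num),
          show (3 : Nat) = 2 + 1 from rfl, pvLoopA_step 2 k 24 'h' 'd' th]
        by_cases h24 : (24 : Int) ∣ k
        · obtain ⟨k2, rfl⟩ := h24
          rw [if_pos (by rw [PySem.Int.mod_eq_zero_iff_dvd]; exact ⟨k2, rfl⟩),
            pvFdiv 24 k2 (by norm_num),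
            show (2 : Nat) = 1 + 1 from rfl, pvLoopA_step 1 k2 30 'd' 'M' td]
          by_cases h30 : (30 : Int) ∣ k2
          · obtain ⟨k3, rfl⟩ := h30
            rw [if_pos (by rw [PySem.Int.mod_eq_zero_iff_dvd]; exact ⟨k3, rfl⟩),
              pvFdiv 30 k3 (by norm_num),
              show (1 : Nat) = 0 + 1 from rfl,
              pvLoopA_stop 0 _ 'M' List.getLast?_concat tM]
            have c1 : (43200 : Int) ∣ 60 * (24 * (30 * k3)) := ⟨k3, by ring⟩
            simp only [pvScanB, PySem.Int.mod_eq_zero_iff_dvd, c1,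
              show ('M' = 'm') = False from by simp, if_false, ite_true]
            rw [show (60 : Int) * (24 * (30 * k3)) = 43200 * k3 from by ring,
              pvFdiv 43200 k3 (by norm_num)]
          · rw [if_neg (by rw [PySem.Int.mod_eq_zero_iff_dvd]; exact h30)]
            have c1 : ¬ (43200 : Int) ∣ 60 * (24 * k2) := by omega
            have c2 : (1440 : Int) ∣ 60 * (24 * k2) := ⟨k2, by ring⟩
            simp only [pvScanB, PySem.Int.mod_eq_zero_iff_dvd, c1, c2,
              show ('d' = 'm') = False from by simp, if_false, ite_true]
            rw [show (60 : Int) * (24 * k2) = 1440 * k2 from by ring,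
              pvFdiv 1440 k2 (by norm_num)]
        · rw [if_neg (by rw [PySem.Int.mod_eq_zero_iff_dvd]; exact h24)]
          have c1 : ¬ (43200 : Int) ∣ 60 * k := by omega
          have c2 : ¬ (1440 : Int) ∣ 60 * k := by omega
          have c3 : (60 : Int) ∣ 60 * k := ⟨k, rfl⟩
          simp only [pvScanB, PySem.Int.mod_eq_zero_iff_dvd, c1, c2, c3,
            show ('h' = 'm') = False from by simp, if_false, ite_true]
          rw [pvFdiv 60 k (by norm_num)]
      · rw [if_neg (by rw [PySem.Int.mod_eq_zero_iff_dvd]; exact h60)]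
        have c1 : ¬ (43200 : Int) ∣ v := by omega
        have c2 : ¬ (1440 : Int) ∣ v := by omega
        have c4 : (1 : Int) ∣ v := one_dvd v
        simp only [pvScanB, PySem.Int.mod_eq_zero_iff_dvd, c1, c2, h60, c4,
          if_false, ite_true]
        simp
    · by_cases hh : u = 'h'
      · subst hh
        obtain ⟨v, hv⟩ := Option.isSome_iff_exists.mp (hp (by simp [hlast]))
        have hA4 : pvLoopA 4 label.toList =
            if PySem.Int.mod v 24 = 0 then
              pvLoopA 3 (PySem.Int.toChars (PySem.Int.floordiv v 24) ++ ['d'])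
            else label.toList := by
          rw [show (4 : Nat) = 3 + 1 from rfl, pvLoopA]
          simp only [hget, th, PySem.List.slice_to_neg_one, hv]
        simp only [hget, show PySem.Dict.get? pvUnits 'h' = some 60 from by decide,
          PySem.List.slice_to_neg_one, hv, hA4]
        by_cases h24 : (24 : Int) ∣ v
        · obtain ⟨k, rfl⟩ := h24
          rw [if_pos (by rw [PySem.Int.mod_eq_zero_iff_dvd]; exact ⟨k, rfl⟩),
            pvFdiv 24 k (by norm_num),
            show (3 : Nat) = 2 + 1 from rfl, pvLoopA_step 2 k 30 'd' 'M' td]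
          by_cases h30 : (30 : Int) ∣ k
          · obtain ⟨k2, rfl⟩ := h30
            rw [if_pos (by rw [PySem.Int.mod_eq_zero_iff_dvd]; exact ⟨k2, rfl⟩),
              pvFdiv 30 k2 (by norm_num),
              show (2 : Nat) = 1 + 1 from rfl,
              pvLoopA_stop 1 _ 'M' List.getLast?_concat tM]
            have c1 : (43200 : Int) ∣ 24 * (30 * k2) * 60 := ⟨k2, by ring⟩
            simp only [pvScanB, PySem.Int.mod_eq_zero_iff_dvd, c1,
              show ('M' = 'h') = False from by simp, if_false, ite_true]
            rw [show (24 : Int) * (30 * k2) * 60 = 43200 * k2 from by ring,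
              pvFdiv 43200 k2 (by norm_num)]
          · rw [if_neg (by rw [PySem.Int.mod_eq_zero_iff_dvd]; exact h30)]
            have c1 : ¬ (43200 : Int) ∣ 24 * k * 60 := by omega
            have c2 : (1440 : Int) ∣ 24 * k * 60 := ⟨k, by ring⟩
            simp only [pvScanB, PySem.Int.mod_eq_zero_iff_dvd, c1, c2,
              show ('d' = 'h') = False from by simp, if_false, ite_true]
            rw [show (24 : Int) * k * 60 = 1440 * k from by ring,
              pvFdiv 1440 k (by norm_num)]
        · rw [if_neg (by rw [PySem.Int.mod_eq_zero_iff_dvd]; exact h24)]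
          have c1 : ¬ (43200 : Int) ∣ v * 60 := by omega
          have c2 : ¬ (1440 : Int) ∣ v * 60 := by omega
          have c3 : (60 : Int) ∣ v * 60 := ⟨v, by ring⟩
          simp only [pvScanB, PySem.Int.mod_eq_zero_iff_dvd, c1, c2, c3,
            if_false, ite_true]
          simp
      · by_cases hd : u = 'd'
        · subst hd
          obtain ⟨v, hv⟩ := Option.isSome_iff_exists.mp (hp (by simp [hlast]))
          have hA4 : pvLoopA 4 label.toList =
              if PySem.Int.mod v 30 = 0 then
                pvLoopA 3 (PySem.Int.toChars (PySem.Int.floordiv v 30) ++ ['M'])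
              else label.toList := by
            rw [show (4 : Nat) = 3 + 1 from rfl, pvLoopA]
            simp only [hget, td, PySem.List.slice_to_neg_one, hv]
          simp only [hget, show PySem.Dict.get? pvUnits 'd' = some 1440 from by decide,
            PySem.List.slice_to_neg_one, hv, hA4]
          by_cases h30 : (30 : Int) ∣ v
          · obtain ⟨k, rfl⟩ := h30
            rw [if_pos (by rw [PySem.Int.mod_eq_zero_iff_dvd]; exact ⟨k, rfl⟩),
              pvFdiv 30 k (by norm_num),
              show (3 : Nat) = 2 + 1 from rfl,
              pvLoopA_stop 2 _ 'M' List.getLast?_concat tM]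
            have c1 : (43200 : Int) ∣ 30 * k * 1440 := ⟨k, by ring⟩
            simp only [pvScanB, PySem.Int.mod_eq_zero_iff_dvd, c1,
              show ('M' = 'd') = False from by simp, if_false, ite_true]
            rw [show (30 : Int) * k * 1440 = 43200 * k from by ring,
              pvFdiv 43200 k (by norm_num)]
          · rw [if_neg (by rw [PySem.Int.mod_eq_zero_iff_dvd]; exact h30)]
            have c1 : ¬ (43200 : Int) ∣ v * 1440 := by omega
            have c2 : (1440 : Int) ∣ v * 1440 := ⟨v, by ring⟩
            simp only [pvScanB, PySem.Int.mod_eq_zero_iff_dvd, c1, c2,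
              if_false, ite_true]
            simp
        · rw [show (4 : Nat) = 3 + 1 from rfl, pvLoopA_stop 3 _ u hlast (pvTrans_none u hm hh hd)]
          simp only [hget, pvUnits_none u hm hh hd]
          simp
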